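-- pv_equiv track=rewrite | github.com/sam-hird/virulence-project | test.py | recursiveFitness
-- ===== SOURCE A (Python) =====
-- def recursiveTransform(bitString):
--   if len(bitString)==1:
--     return bitString[0]
--   else:
--     sublistLength = len(bitString)//2
--     return simpleTransform(recursiveTransform(bitString[0:sublistLength]), recursiveTransform(bitString[sublistLength:]))
--
-- def simpleTransform(leftBit, rightBit):
--   if leftBit == None or rightBit == None or leftBit != rightBit:
--     return None
--   else:
--     return leftBit
--
-- def recursiveFitness(bitString):
--   if len(bitString) == 1:
--     return simpleFitness(bitString[0])
--   else:
--     sublistLength = len(bitString)//2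
--     total =  len(bitString) * simpleFitness(recursiveTransform(bitString))
--     total += recursiveFitness(bitString[:sublistLength])
--     total += recursiveFitness(bitString[sublistLength:])
--     return total
--
-- def simpleFitness(bit):
--   return 1 if bit != None else 0
-- ===== SOURCE B (Python) =====
-- def recursiveFitness(bitString):
--     # One bottom-up pass: each node returns (all-equal transform, fitness of subtree),
--     # so the transform is computed once per node instead of re-deriving it at every level.
--     def go(bs):
--         if len(bs) == 1:
--             b = bs[0]
--             return b, (1 if b is not None else 0)
--         m = len(bs) // 2
--         lt, lf = go(bs[:m])
--         rt, rf = go(bs[m:])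
--         t = lt if (lt is not None and lt == rt) else None
--         return t, lf + rf + len(bs) * (1 if t is not None else 0)
--     return go(bitString)[1]
-- ===== Notes on version B (the rewrite author's own statement) =====
-- stated objective: faster
-- what changed: Instead of recomputing recursiveTransform of the whole segment at every recursion level, B does a single bottom-up pass in which each node returns the pair (transform, fitness) built from its children once.
import Mathlib
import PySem

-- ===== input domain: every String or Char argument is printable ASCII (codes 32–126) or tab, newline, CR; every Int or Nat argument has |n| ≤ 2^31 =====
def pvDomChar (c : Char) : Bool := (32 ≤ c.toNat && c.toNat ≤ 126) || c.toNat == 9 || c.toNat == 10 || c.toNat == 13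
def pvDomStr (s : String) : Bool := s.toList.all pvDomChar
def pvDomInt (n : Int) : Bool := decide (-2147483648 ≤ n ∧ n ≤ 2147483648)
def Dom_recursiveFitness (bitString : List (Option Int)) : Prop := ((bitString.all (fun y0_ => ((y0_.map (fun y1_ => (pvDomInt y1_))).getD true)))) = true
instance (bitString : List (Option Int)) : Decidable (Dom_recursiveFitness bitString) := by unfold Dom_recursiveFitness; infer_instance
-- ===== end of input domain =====

-- B computes the same value by one bottom-up pass returning (transform, fitness) per node; objective: faster.
-- ===== PORT A =====
-- the slices bitString[0:m] and bitString[m:] with 0 ≤ m ≤ len are exactly take/drop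
def simpleTransform (leftBit rightBit : Option Int) : Option Int :=
  if leftBit = none ∨ rightBit = none ∨ leftBit ≠ rightBit then none else leftBit

def simpleFitness (bit : Option Int) : Int := if bit ≠ none then 1 else 0

def recursiveTransform : List (Option Int) → Option Int
  | [] => none                     -- totality guard: Python diverges on []
  | [b] => b
  | a :: b :: rest =>
      let bs := a :: b :: rest
      let sublistLength := bs.length / 2
      simpleTransform (recursiveTransform (bs.take sublistLength)) (recursiveTransform (bs.drop sublistLength))
  termination_by bs => bs.length
  decreasing_by all_goals simp; omega

def recursiveFitness : List (Option Int) → Int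
  | [] => 0                        -- totality guard: Python diverges on []
  | [b] => simpleFitness b
  | a :: b :: rest =>
      let bs := a :: b :: rest
      let sublistLength := bs.length / 2
      (bs.length : Int) * simpleFitness (recursiveTransform bs)
        + recursiveFitness (bs.take sublistLength)
        + recursiveFitness (bs.drop sublistLength)
  termination_by bs => bs.length
  decreasing_by all_goals simp; omega

-- ===== PORT B =====
def goAlt : List (Option Int) → Option Int × Int
  | [] => (none, 0)                -- totality guard: Python diverges on []
  | [b] => (b, if b ≠ none then 1 else 0)
  | a :: b :: rest =>
      let bs := a :: b :: rest
      let m := bs.length / 2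
      let l := goAlt (bs.take m)
      let r := goAlt (bs.drop m)
      let t := if l.1 ≠ none ∧ l.1 = r.1 then l.1 else none
      (t, l.2 + r.2 + (bs.length : Int) * (if t ≠ none then 1 else 0))
  termination_by bs => bs.length
  decreasing_by all_goals simp; omega

def recursiveFitness_alt (bitString : List (Option Int)) : Int := (goAlt bitString).2

-- ===== PRECONDITION & SPEC =====
-- Pre_ excludes only the empty list, on which Python's A recurses forever (RecursionError), as does B.
def Pre_recursiveFitness (bitString : List (Option Int)) : Prop := bitString ≠ []
instance (bitString : List (Option Int)) : Decidable (Pre_recursiveFitness bitString) := by unfold Pre_recursiveFitness; infer_instance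
def pvWitness_recursiveFitness : List (Option Int) := [some 1, none, some 1]

def Spec_recursiveFitness (bitString : List (Option Int)) (out : Int) : Prop := out = recursiveFitness_alt bitString
instance (bitString : List (Option Int)) (out : Int) : Decidable (Spec_recursiveFitness bitString out) := by unfold Spec_recursiveFitness; infer_instance

-- ===== CLAIM (what is proved, stated in full; the proofs are below) =====
def Claim_equal_recursiveFitness : Prop := ∀ (bitString : List (Option Int)), Dom_recursiveFitness bitString → Pre_recursiveFitness bitString → Spec_recursiveFitness bitString (recursiveFitness bitString)

-- ===== LEMMAS AND PROOFS =====
theorem tAlt_eq (l r : Option Int) : (if l ≠ none ∧ l = r then l else none) = simpleTransform l r := by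
  unfold simpleTransform
  split_ifs with h1 h2 <;> simp_all

theorem goAlt_eq (bs : List (Option Int)) : goAlt bs = (recursiveTransform bs, recursiveFitness bs) := by
  match bs with
  | [] => simp [goAlt, recursiveTransform, recursiveFitness]
  | [b] => simp [goAlt, recursiveTransform, recursiveFitness, simpleFitness]
  | a :: b :: rest =>
    have hl := goAlt_eq ((a :: b :: rest).take ((a :: b :: rest).length / 2))
    have hr := goAlt_eq ((a :: b :: rest).drop ((a :: b :: rest).length / 2))
    rw [goAlt]
    simp only [hl, hr]
    conv_rhs => rw [recursiveFitness, recursiveTransform]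
    rw [Prod.mk.injEq]
    refine ⟨tAlt_eq _ _, ?_⟩
    rw [tAlt_eq]
    simp only [simpleFitness]
    ring
  termination_by bs.length
  decreasing_by all_goals simp; omega

-- ===== VERDICT (by name: the statement is the Claim_ definition above) =====
theorem recursiveFitness_spec : Claim_equal_recursiveFitness := by
  intro bs _ _
  unfold Spec_recursiveFitness recursiveFitness_alt
  rw [goAlt_eq]
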